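-- pv_equiv track=rewrite | github.com/dieupatr/RegelNetzwerk | Projekt/DataDrivenInterferenz.py | DataDrivenInter
-- ===== SOURCE A (Python) =====
-- def CountNumFacts(Facts):
--
--        NumberNone=0
--        for fact in Facts:
--
--               if fact!=None :
--                      NumberNone=NumberNone+1
--
--        return NumberNone
--
-- def DataDrivenInter(State):
--
--        #Start
--
--        [A,B,C,D]=State
--        Facts=[A,B,C,D]
--
--        Num_new=CountNumFacts(Facts)
--
--
--        while( True ):
--
--               Num_old=Num_new
--
--               #Logic rule based network
--
--               if (A==1) and (B==1):  C=1
--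
--               if( C==1) : D=1
--
--               ######
--
--               #Refresh set of facts
--               Facts=  [A,B,C,D]
--               Num_new=CountNumFacts(Facts)
--
--
--               #Check converge
--
--               if( Num_new == Num_old) :  break
--
--        return Facts
-- ===== SOURCE B (Python) =====
-- def DataDrivenInter(State):
--     A, B, C, D = State
--     C = 1 if (A == 1 and B == 1) else C
--     D = 1 if C == 1 else D
--     return [A, B, C, D]
-- ===== Notes on version B (the rewrite author's own statement) =====
-- stated objective: simpler
-- what changed: Drops the while loop and the CountNumFacts convergence counter: both rules are idempotent and D's rule reads the already-updated C, so one straight-line application of the two rules equals the fixpoint.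
import Mathlib
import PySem

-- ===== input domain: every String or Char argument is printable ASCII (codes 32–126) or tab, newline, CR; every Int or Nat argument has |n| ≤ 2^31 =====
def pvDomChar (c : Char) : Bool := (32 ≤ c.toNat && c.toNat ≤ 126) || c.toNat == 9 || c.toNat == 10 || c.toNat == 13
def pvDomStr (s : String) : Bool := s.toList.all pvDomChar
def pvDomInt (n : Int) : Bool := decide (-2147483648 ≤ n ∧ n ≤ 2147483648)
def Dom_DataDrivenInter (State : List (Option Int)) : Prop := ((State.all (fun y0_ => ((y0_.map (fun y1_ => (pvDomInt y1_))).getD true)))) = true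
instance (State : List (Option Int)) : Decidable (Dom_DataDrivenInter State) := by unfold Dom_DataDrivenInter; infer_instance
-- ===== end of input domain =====

-- ===== PORT A =====
-- B removes A's while loop and convergence counter; one rule application is the fixpoint (proved below).
def CountNumFacts (Facts : List (Option Int)) : Int :=
  Facts.foldl (fun n fact => if fact ≠ none then n + 1 else n) 0

-- the 'while True' loop; fuel only guards totality (the loop provably breaks within 2 iterations)
def DDloop (A B C D : Option Int) (numNew : Int) : Nat → List (Option Int)
  | 0 => [A, B, C, D]
  | fuel + 1 =>
    let numOld := numNew
    let C' := if A = some 1 ∧ B = some 1 then some 1 else C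
    let D' := if C' = some 1 then some 1 else D
    let facts := [A, B, C', D']
    let numNew' := CountNumFacts facts
    if numNew' = numOld then facts else DDloop A B C' D' numNew' fuel

def DataDrivenInter (State : List (Option Int)) : List (Option Int) :=
  match State with
  | A :: B :: C :: D :: rest =>
    match rest with
    | [] => DDloop A B C D (CountNumFacts [A, B, C, D]) 8
    | _ => []  -- Python raises ValueError here (unpacking); excluded by Pre_
  | _ => []  -- Python raises ValueError here (unpacking); excluded by Pre_

-- ===== PORT B =====
def DataDrivenInter_alt (State : List (Option Int)) : List (Option Int) :=
  if State.length = 4 then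
    let A := State.getD 0 none
    let B := State.getD 1 none
    let C := State.getD 2 none
    let D := State.getD 3 none
    let C' := if A = some 1 ∧ B = some 1 then some 1 else C
    let D' := if C' = some 1 then some 1 else D
    [A, B, C', D']
  else []  -- Python raises ValueError here (unpacking); excluded by Pre_

-- ===== PRECONDITION & SPEC =====
-- A (and B) raise ValueError unless State unpacks into exactly four facts.
def Pre_DataDrivenInter (State : List (Option Int)) : Prop := State.length = 4
instance (State : List (Option Int)) : Decidable (Pre_DataDrivenInter State) := by unfold Pre_DataDrivenInter; infer_instance
def pvWitness_DataDrivenInter : List (Option Int) := [some 1, some 1, none, none]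
def Spec_DataDrivenInter (State : List (Option Int)) (out : List (Option Int)) : Prop := out = DataDrivenInter_alt State
instance (State : List (Option Int)) (out : List (Option Int)) : Decidable (Spec_DataDrivenInter State out) := by unfold Spec_DataDrivenInter; infer_instance

-- ===== CLAIM (what is proved, stated in full; the proofs are below) =====
def Claim_equal_DataDrivenInter : Prop := ∀ (State : List (Option Int)), Dom_DataDrivenInter State → Pre_DataDrivenInter State → Spec_DataDrivenInter State (DataDrivenInter State)

-- ===== LEMMAS AND PROOFS =====

-- one rule application is a fixpoint, so the loop breaks on its first or second iteration
lemma DDloop_eq (A B C D : Option Int) (n : Int) (fuel : Nat) (h : 2 ≤ fuel) :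
    DDloop A B C D n fuel =
      (let C' := if A = some 1 ∧ B = some 1 then some 1 else C
       let D' := if C' = some 1 then some 1 else D
       [A, B, C', D']) := by
  obtain ⟨f, rfl⟩ : ∃ f, fuel = f + 2 := ⟨fuel - 2, by omega⟩
  simp only [DDloop]
  by_cases h1 : A = some 1 ∧ B = some 1 <;>
    simp only [h1, if_pos, if_neg, if_true, if_false] <;>
    split_ifs <;> simp_all [DDloop]

-- ===== VERDICT (by name: the statement is the Claim_ definition above) =====
theorem DataDrivenInter_spec : Claim_equal_DataDrivenInter := by
  intro State _ hPre
  unfold Pre_DataDrivenInter at hPre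
  match State, hPre with
  | [A, B, C, D], _ =>
    unfold Spec_DataDrivenInter DataDrivenInter DataDrivenInter_alt
    simp [DDloop_eq A B C D _ 8 (by omega), List.getD]
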